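-- pv_equiv track=rewrite | github.com/bc36/leetcode | lc_Python/lc2300_2399.py | secondsToRemoveOccurrences
-- ===== SOURCE A (Python) =====
-- def secondsToRemoveOccurrences(s: str) -> int:
--     ans = pre0 = 0
--     for c in s:
--         if c == "0":
--             pre0 += 1
--         if c == "1" and pre0:
--             ans = max(ans + 1, pre0)
--     return ans
-- ===== SOURCE B (Python) =====
-- def secondsToRemoveOccurrences(s: str) -> int:
--     # Collect the zero-count before each '1' that has a zero in front of it,
--     # then take the closed-form maximum instead of A's running max-recurrence.
--     zs = []
--     z = 0
--     for c in s:
--         if c == "0":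
--             z += 1
--         elif c == "1" and z > 0:
--             zs.append(z)
--     k = len(zs)
--     cands = [v + (k - 1 - i) for i, v in enumerate(zs)]
--     return max(cands) if cands else 0
-- ===== Notes on version B (the rewrite author's own statement) =====
-- stated objective: alternative
-- what changed: Replaces A's running max-recurrence (ans = max(ans+1, pre0) updated at every qualifying one-character) by a closed-form maximum: collect the zero-count before each one-character that is preceded by a zero, then return the max of z_i + (k-1-i), i.e. each one's finishing time computed directly.
import Mathlib
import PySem

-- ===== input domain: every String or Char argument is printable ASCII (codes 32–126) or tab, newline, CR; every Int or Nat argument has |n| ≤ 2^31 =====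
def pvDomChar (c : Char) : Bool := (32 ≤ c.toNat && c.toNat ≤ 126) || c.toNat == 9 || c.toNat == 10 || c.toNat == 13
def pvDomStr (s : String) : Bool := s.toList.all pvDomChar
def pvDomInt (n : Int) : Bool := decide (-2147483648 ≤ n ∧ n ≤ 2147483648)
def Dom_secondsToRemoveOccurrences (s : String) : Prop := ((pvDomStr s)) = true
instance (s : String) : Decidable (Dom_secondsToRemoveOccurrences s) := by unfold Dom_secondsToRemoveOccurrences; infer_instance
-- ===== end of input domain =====

-- B replaces A's running max-recurrence by a closed-form maximum over the
-- qualifying '1' positions; same O(n) cost, different algorithm (objective: alternative).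

-- ===== PORT A =====
def secondsToRemoveOccurrences (s : String) : Int :=
  (s.toList.foldl (fun (st : Int × Int) c =>
      let pre0 := if c = '0' then st.2 + 1 else st.2
      let ans := if c = '1' ∧ pre0 ≠ 0 then max (st.1 + 1) pre0 else st.1
      (ans, pre0)) (0, 0)).1

-- ===== PORT B =====
def secondsToRemoveOccurrences_alt (s : String) : Int :=
  let st := s.toList.foldl (fun (st : Int × List Int) c =>
      if c = '0' then (st.1 + 1, st.2)
      else if c = '1' ∧ st.1 > 0 then (st.1, st.2 ++ [st.1])
      else st) (0, ([] : List Int))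
  let zs := st.2
  let k : Int := zs.length
  let cands := zs.zipIdx.map (fun p => p.1 + (k - 1 - (p.2 : Int)))
  match cands with
  | [] => 0
  | x :: xs => xs.foldl max x

-- ===== PRECONDITION & SPEC =====
def Spec_secondsToRemoveOccurrences (s : String) (out : Int) : Prop := out = secondsToRemoveOccurrences_alt s
instance (s : String) (out : Int) : Decidable (Spec_secondsToRemoveOccurrences s out) := by unfold Spec_secondsToRemoveOccurrences; infer_instance

-- ===== CLAIM (what is proved, stated in full; the proofs are below) =====
def Claim_equal_secondsToRemoveOccurrences : Prop := ∀ (s : String), Dom_secondsToRemoveOccurrences s → Spec_secondsToRemoveOccurrences s (secondsToRemoveOccurrences s)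

-- ===== LEMMAS AND PROOFS =====

-- A's step and B's zs-collecting step, as named functions
def pvStepA (st : Int × Int) (c : Char) : Int × Int :=
  let pre0 := if c = '0' then st.2 + 1 else st.2
  let ans := if c = '1' ∧ pre0 ≠ 0 then max (st.1 + 1) pre0 else st.1
  (ans, pre0)

def pvStepB (st : Int × List Int) (c : Char) : Int × List Int :=
  if c = '0' then (st.1 + 1, st.2)
  else if c = '1' ∧ st.1 > 0 then (st.1, st.2 ++ [st.1])
  else st

-- A's result as a fold of the max-recurrence over a list of zero-counts
def pvG (zs : List Int) : Int := zs.foldl (fun a v => max (a + 1) v) 0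

-- B's closed-form value of a zero-count list
def pvM (zs : List Int) : Int :=
  match zs.zipIdx.map (fun p => p.1 + ((zs.length : Int) - 1 - (p.2 : Int))) with
  | [] => 0
  | x :: xs => xs.foldl max x

theorem pvG_append (zs : List Int) (v : Int) :
    pvG (zs ++ [v]) = max (pvG zs + 1) v := by
  simp [pvG, List.foldl_append]

theorem pvFoldMax_map_add (x : Int) (l : List Int) (c : Int) :
    (l.map (· + c)).foldl max (x + c) = l.foldl max x + c := by
  induction l generalizing x with
  | nil => simp
  | cons h t ih =>
      simp only [List.map_cons, List.foldl_cons]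
      rw [show max (x + c) (h + c) = max x h + c by
        rcases le_total x h with hle | hle
        · rw [max_eq_right hle, max_eq_right (by omega : x + c ≤ h + c)]
        · rw [max_eq_left hle, max_eq_left (by omega : h + c ≤ x + c)]]
      exact ih _

def pvCands (zs : List Int) : List Int :=
  zs.zipIdx.map (fun p => p.1 + ((zs.length : Int) - 1 - (p.2 : Int)))

theorem pvM_cands (zs : List Int) :
    pvM zs = match pvCands zs with | [] => 0 | x :: xs => xs.foldl max x := rfl

theorem pvCands_append (zs : List Int) (v : Int) :
    pvCands (zs ++ [v]) = (pvCands zs).map (· + 1) ++ [v] := by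
  simp only [pvCands, List.zipIdx_append, List.map_append, List.map_map]
  congr 1
  · refine List.map_congr_left ?_
    intro p _
    simp only [Function.comp_apply, List.length_append, List.length_cons, List.length_nil]
    push_cast
    ring
  · simp only [List.zipIdx, List.map_cons, List.map_nil, List.length_append,
      List.length_cons, List.length_nil]
    congr 1
    push_cast
    ring

theorem pvM_append (zs : List Int) (v : Int) :
    pvM (zs ++ [v]) = if zs = [] then v else max (pvM zs + 1) v := by
  rw [pvM_cands, pvCands_append]
  by_cases hzs : zs = []
  · subst hzs
    simp [pvCands]
  · have hne : pvCands zs ≠ [] := by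
      simp [pvCands, hzs]
    cases hc : pvCands zs with
    | nil => exact absurd hc hne
    | cons x xs =>
      have hM : pvM zs = xs.foldl max x := by rw [pvM_cands, hc]
      rw [if_neg hzs, hM]
      show ((xs.map (· + 1)) ++ [v]).foldl max (x + 1) = max (xs.foldl max x + 1) v
      rw [List.foldl_append, pvFoldMax_map_add x xs 1]
      simp

-- the closed form equals the recurrence fold, provided every entry is positive
theorem pvG_eq_pvM (zs : List Int) (h : ∀ v ∈ zs, 1 ≤ v) : pvG zs = pvM zs := by
  induction zs using List.reverseRecOn with
  | nil => simp [pvG, pvM]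
  | append_singleton l v ih =>
      have hv : 1 ≤ v := h v (by simp)
      rw [pvG_append, pvM_append]
      rcases eq_or_ne l [] with rfl | hne
      · simp [pvG]; omega
      · rw [if_neg hne, ih (fun w hw => h w (by simp [hw]))]

-- joint invariant of the two folds
theorem pvFold_inv (l : List Char) :
    ∀ (ans z : Int) (zs : List Int), 0 ≤ z → ans = pvG zs →
      (l.foldl pvStepA (ans, z)).1 = pvG ((l.foldl pvStepB (z, zs)).2)
      ∧ 0 ≤ (l.foldl pvStepB (z, zs)).1 := by
  induction l with
  | nil =>
      intro ans z zs hz hans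
      exact ⟨by simpa using hans, by simpa using hz⟩
  | cons c t ih =>
      intro ans z zs hz hans
      simp only [List.foldl_cons]
      by_cases h0 : c = '0'
      · have : pvStepA (ans, z) c = (ans, z + 1) := by
          simp [pvStepA, h0]
        rw [this, show pvStepB (z, zs) c = (z + 1, zs) by simp [pvStepB, h0]]
        exact ih ans (z + 1) zs (by omega) hans
      · by_cases h1 : c = '1' ∧ z > 0
        · have hA : pvStepA (ans, z) c = (max (ans + 1) z, z) := by
            simp [pvStepA, h1.1]
            intro h; omega
          have hB : pvStepB (z, zs) c = (z, zs ++ [z]) := by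
            simp [pvStepB, h1]
          rw [hA, hB]
          exact ih _ z (zs ++ [z]) hz (by rw [pvG_append, hans])
        · have hA : pvStepA (ans, z) c = (ans, z) := by
            by_cases hc1 : c = '1'
            · have hz0 : z = 0 := by
                rcases lt_or_eq_of_le hz with h | h
                · exact absurd ⟨hc1, h⟩ h1
                · omega
              simp [pvStepA, hc1, hz0]
            · simp [pvStepA, h0, hc1]
          have hB : pvStepB (z, zs) c = (z, zs) := by
            simp [pvStepB, h0, h1]
          rw [hA, hB]
          exact ih ans z zs hz hans

-- all collected zero-counts are ≥ 1
theorem pvFold_pos (l : List Char) :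
    ∀ (z : Int) (zs : List Int), 0 ≤ z → (∀ v ∈ zs, 1 ≤ v) →
      ∀ v ∈ (l.foldl pvStepB (z, zs)).2, 1 ≤ v := by
  induction l with
  | nil => intro z zs hz hzs; simpa using hzs
  | cons c t ih =>
      intro z zs hz hzs
      simp only [List.foldl_cons]
      by_cases h0 : c = '0'
      · rw [show pvStepB (z, zs) c = (z + 1, zs) by simp [pvStepB, h0]]
        exact ih (z + 1) zs (by omega) hzs
      · by_cases h1 : c = '1' ∧ z > 0
        · rw [show pvStepB (z, zs) c = (z, zs ++ [z]) by simp [pvStepB, h1]]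
          refine ih z (zs ++ [z]) hz ?_
          intro v hv
          rcases List.mem_append.1 hv with h | h
          · exact hzs v h
          · simp at h; omega
        · rw [show pvStepB (z, zs) c = (z, zs) by simp [pvStepB, h0, h1]]
          exact ih z zs hz hzs

-- ===== VERDICT (by name: the statement is the Claim_ definition above) =====
theorem secondsToRemoveOccurrences_spec : Claim_equal_secondsToRemoveOccurrences := by
  intro s _
  show secondsToRemoveOccurrences s = secondsToRemoveOccurrences_alt s
  have hA : secondsToRemoveOccurrences s
      = (s.toList.foldl pvStepA ((0 : Int), (0 : Int))).1 := rfl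
  have hB : secondsToRemoveOccurrences_alt s
      = pvM ((s.toList.foldl pvStepB ((0 : Int), ([] : List Int))).2) := rfl
  rw [hA, hB]
  have hinv := (pvFold_inv s.toList 0 0 [] le_rfl (by simp [pvG])).1
  rw [hinv]
  exact pvG_eq_pvM _ (pvFold_pos s.toList 0 [] le_rfl (by simp))
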